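-- pv_equiv track=rewrite | github.com/skuxszn/liveradio_teki | metadata_watcher/track_resolver.py | _normalize_track_key
-- ===== SOURCE A (Python) =====
-- def _normalize_track_key(artist: str, title: str) -> str:
--     """Normalize track key for consistent matching.
--
--     Normalization:
--     - Lowercase
--     - Strip whitespace
--     - Remove special characters that might cause filesystem issues
--
--     Args:
--         artist: Artist name.
--         title: Song title.
--
--     Returns:
--         str: Normalized track key in format "artist - title".
--     """
--     # Basic normalization
--     artist_norm = artist.lower().strip()
--     title_norm = title.lower().strip()
--
--     # Remove problematic characters for filesystem
--     chars_to_remove = ["/", "\\", ":", "*", "?", '"', "<", ">", "|"]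
--     for char in chars_to_remove:
--         artist_norm = artist_norm.replace(char, "")
--         title_norm = title_norm.replace(char, "")
--
--     # Collapse multiple spaces
--     artist_norm = " ".join(artist_norm.split())
--     title_norm = " ".join(title_norm.split())
--
--     return f"{artist_norm} - {title_norm}"
-- ===== SOURCE B (Python) =====
-- BAD = frozenset('/\\:*?"<>|')
--
--
-- def _normalize_track_key(artist: str, title: str) -> str:
--     def clean(s: str) -> str:
--         # one pass: lowercase + drop bad chars, then collapse whitespace
--         return " ".join("".join(c for c in s.lower() if c not in BAD).split())
--
--     return f"{clean(artist)} - {clean(title)}"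
-- ===== Notes on version B (the rewrite author's own statement) =====
-- stated objective: simpler
-- what changed: Replaces the nine whole-string replace() rescans with a single pass per string that keeps each character unless it is in a precomputed bad-character set, and drops the now-redundant strip() since ' '.join(split()) already discards edge whitespace.
import Mathlib
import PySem

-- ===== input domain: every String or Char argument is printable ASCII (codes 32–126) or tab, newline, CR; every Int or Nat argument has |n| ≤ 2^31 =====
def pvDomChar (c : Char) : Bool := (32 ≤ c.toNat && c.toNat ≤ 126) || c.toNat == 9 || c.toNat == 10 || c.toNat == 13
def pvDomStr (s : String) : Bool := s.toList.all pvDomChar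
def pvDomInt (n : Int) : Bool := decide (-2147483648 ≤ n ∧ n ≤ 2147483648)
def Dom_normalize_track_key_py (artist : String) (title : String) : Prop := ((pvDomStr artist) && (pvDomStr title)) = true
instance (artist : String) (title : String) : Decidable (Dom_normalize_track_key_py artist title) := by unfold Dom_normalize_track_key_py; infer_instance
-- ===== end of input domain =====

-- B replaces A's nine whole-string replace() rescans by one filtering pass per string
-- against a precomputed bad-character set (objective: simpler; return value only, no mutation).

-- ===== PORT A =====
-- chars_to_remove, as in A
def pvBadList : List Char := ['/', '\\', ':', '*', '?', '"', '<', '>', '|']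

def normalize_track_key_py (artist : String) (title : String) : String :=
  -- artist_norm = artist.lower().strip(); title_norm = title.lower().strip()
  let a0 := PySem.Chars.strip (PySem.Chars.lower artist.toList)
  let t0 := PySem.Chars.strip (PySem.Chars.lower title.toList)
  -- for char in chars_to_remove: both .replace(char, "")
  let p := pvBadList.foldl
    (fun (p : List Char × List Char) c =>
      (PySem.Chars.replace p.1 [c] [], PySem.Chars.replace p.2 [c] [])) (a0, t0)
  -- " ".join(x.split())
  let a2 := PySem.Chars.join [' '] (PySem.Chars.split₀ p.1)
  let t2 := PySem.Chars.join [' '] (PySem.Chars.split₀ p.2)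
  -- f"{artist_norm} - {title_norm}"
  String.ofList (a2 ++ [' ', '-', ' '] ++ t2)

-- ===== PORT B =====
-- BAD = frozenset('/\\:*?"<>|')
def pvBadSet : PySem.Set Char := PySem.Set.ofList ['/', '\\', ':', '*', '?', '"', '<', '>', '|']

-- clean(s) = " ".join("".join(c for c in s.lower() if c not in BAD).split())
def pvClean (s : String) : List Char :=
  PySem.Chars.join [' ']
    (PySem.Chars.split₀
      ((PySem.Chars.lower s.toList).filter (fun c => !(PySem.Set.contains pvBadSet c))))

def normalize_track_key_py_alt (artist : String) (title : String) : String :=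
  String.ofList (pvClean artist ++ [' ', '-', ' '] ++ pvClean title)

-- ===== PRECONDITION & SPEC =====
def Spec_normalize_track_key_py (artist : String) (title : String) (out : String) : Prop := out = normalize_track_key_py_alt artist title
instance (artist : String) (title : String) (out : String) : Decidable (Spec_normalize_track_key_py artist title out) := by unfold Spec_normalize_track_key_py; infer_instance

-- ===== CLAIM (what is proved, stated in full; the proofs are below) =====
def Claim_equal_normalize_track_key_py : Prop := ∀ (artist : String) (title : String), Dom_normalize_track_key_py artist title → Spec_normalize_track_key_py artist title (normalize_track_key_py artist title)

-- ===== LEMMAS AND PROOFS =====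

-- replace l [c] "" removes exactly the occurrences of c
theorem pv_replace_go_single (c : Char) : ∀ (l : List Char) (fuel : Nat) (acc : List Char),
    l.length ≤ fuel →
    PySem.Chars.replace.go [c] [] fuel l acc = acc.reverse ++ l.filter (fun x => x != c) := by
  intro l
  induction l with
  | nil => intro fuel acc _; cases fuel <;> simp [PySem.Chars.replace.go]
  | cons x t ih =>
    intro fuel acc h
    cases fuel with
    | zero => simp at h
    | succ f =>
      simp only [List.length_cons, Nat.succ_le_succ_iff] at h
      by_cases hx : c = x
      · subst hx
        simp [PySem.Chars.replace.go, List.isPrefixOf, ih f acc h]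
      · have hbx : (c == x) = false := by simp [hx]
        have hxb : (x == c) = false := beq_eq_false_iff_ne.mpr (Ne.symm hx)
        simp [PySem.Chars.replace.go, List.isPrefixOf, hbx, hxb, ih f (x :: acc) h, bne]

theorem pv_replace_single (c : Char) (l : List Char) :
    PySem.Chars.replace l [c] [] = l.filter (fun x => x != c) := by
  have := pv_replace_go_single c l l.length [] (le_refl _)
  simpa [PySem.Chars.replace] using this

-- the 9 sequential replaces are one filter against the bad list
theorem pv_fold_replace (bad : List Char) : ∀ (l : List Char),
    bad.foldl (fun s c => PySem.Chars.replace s [c] []) l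
      = l.filter (fun x => !(bad.contains x)) := by
  induction bad with
  | nil => intro l; simp
  | cons b bs ih =>
    intro l
    rw [List.foldl_cons, pv_replace_single, ih, List.filter_filter]
    refine List.filter_congr (fun x _ => ?_)
    by_cases hx : x = b
    · simp [hx]
    · simp [hx]

-- A's fold over the pair is the fold on each component
theorem pv_pair_foldl (bad : List Char) : ∀ (a b : List Char),
    bad.foldl (fun (p : List Char × List Char) c =>
        (PySem.Chars.replace p.1 [c] [], PySem.Chars.replace p.2 [c] [])) (a, b)
      = (bad.foldl (fun s c => PySem.Chars.replace s [c] []) a,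
         bad.foldl (fun s c => PySem.Chars.replace s [c] []) b) := by
  induction bad with
  | nil => intro a b; simp
  | cons c cs ih => intro a b; simp [ih]

-- split₀.go on all-whitespace input with empty word state yields acc.reverse
theorem pv_split_go_ws : ∀ (ws : List Char), (∀ c ∈ ws, PySem.Chars.isspace c = true) →
    ∀ (acc : List (List Char)), PySem.Chars.split₀.go ws [] acc = acc.reverse := by
  intro ws
  induction ws with
  | nil => intro _ acc; simp [PySem.Chars.split₀.go]
  | cons w t ih =>
    intro h acc
    have hw : PySem.Chars.isspace w = true := h w (by simp)
    simp [PySem.Chars.split₀.go, hw, ih (fun c hc => h c (by simp [hc])) acc]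

-- leading whitespace is ignored
theorem pv_split_go_ws_prefix : ∀ (ws : List Char), (∀ c ∈ ws, PySem.Chars.isspace c = true) →
    ∀ (x : List Char) (acc : List (List Char)),
      PySem.Chars.split₀.go (ws ++ x) [] acc = PySem.Chars.split₀.go x [] acc := by
  intro ws
  induction ws with
  | nil => intro _ x acc; simp
  | cons w t ih =>
    intro h x acc
    have hw : PySem.Chars.isspace w = true := h w (by simp)
    simp [PySem.Chars.split₀.go, hw, ih (fun c hc => h c (by simp [hc])) x acc]

-- trailing whitespace is ignored
theorem pv_split_go_ws_suffix (ws : List Char) (hws : ∀ c ∈ ws, PySem.Chars.isspace c = true) :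
    ∀ (x cur : List Char) (acc : List (List Char)),
      PySem.Chars.split₀.go (x ++ ws) cur acc = PySem.Chars.split₀.go x cur acc := by
  intro x
  induction x with
  | nil =>
    intro cur acc
    cases ws with
    | nil => simp
    | cons w t =>
      have hw : PySem.Chars.isspace w = true := hws w (by simp)
      have ht : ∀ c ∈ t, PySem.Chars.isspace c = true := fun c hc => hws c (by simp [hc])
      cases cur with
      | nil => simp [PySem.Chars.split₀.go, hw, pv_split_go_ws t ht]
      | cons d ds => simp [PySem.Chars.split₀.go, hw, pv_split_go_ws t ht]
  | cons c x' ih =>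
    intro cur acc
    by_cases hc : PySem.Chars.isspace c = true
    · cases cur with
      | nil => simp [PySem.Chars.split₀.go, hc, ih]
      | cons d ds => simp [PySem.Chars.split₀.go, hc, ih]
    · simp [PySem.Chars.split₀.go, hc, ih]

-- no bad character is whitespace
theorem pv_ws_not_bad {c : Char} (h : PySem.Chars.isspace c = true) :
    (!(pvBadList.contains c)) = true := by
  by_contra hb
  have hmem : c ∈ pvBadList := by
    simpa using (Bool.not_eq_true _).mp hb
  have : PySem.Chars.isspace c = false := by
    fin_cases hmem <;> decide
  simp [this] at h

-- strip l = l minus whitespace margins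
theorem pv_strip_decomp (l : List Char) :
    ∃ a b : List Char, l = a ++ PySem.Chars.strip l ++ b ∧
      (∀ c ∈ a, PySem.Chars.isspace c = true) ∧ (∀ c ∈ b, PySem.Chars.isspace c = true) := by
  refine ⟨l.takeWhile PySem.Chars.isspace,
    ((l.dropWhile PySem.Chars.isspace).reverse.takeWhile PySem.Chars.isspace).reverse, ?_, ?_, ?_⟩
  · have h3 : (l.dropWhile PySem.Chars.isspace).reverse
        = (l.dropWhile PySem.Chars.isspace).reverse.takeWhile PySem.Chars.isspace
          ++ (l.dropWhile PySem.Chars.isspace).reverse.dropWhile PySem.Chars.isspace :=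
      (List.takeWhile_append_dropWhile).symm
    have h2 := congrArg List.reverse h3
    rw [List.reverse_reverse, List.reverse_append] at h2
    have hd : PySem.Chars.strip l
        = ((l.dropWhile PySem.Chars.isspace).reverse.dropWhile PySem.Chars.isspace).reverse := rfl
    calc l = l.takeWhile PySem.Chars.isspace ++ l.dropWhile PySem.Chars.isspace :=
            (List.takeWhile_append_dropWhile).symm
      _ = l.takeWhile PySem.Chars.isspace
            ++ (PySem.Chars.strip l
              ++ ((l.dropWhile PySem.Chars.isspace).reverse.takeWhile PySem.Chars.isspace).reverse) := by
            rw [hd]; exact congrArg _ h2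
      _ = _ := (List.append_assoc _ _ _).symm
  · exact fun c hc => List.mem_takeWhile_imp hc
  · intro c hc
    rw [List.mem_reverse] at hc
    exact List.mem_takeWhile_imp hc

-- splitting the filtered stripped string = splitting the filtered string
theorem pv_split_filter_strip (l : List Char) :
    PySem.Chars.split₀ ((PySem.Chars.strip l).filter (fun x => !(pvBadList.contains x)))
      = PySem.Chars.split₀ (l.filter (fun x => !(pvBadList.contains x))) := by
  obtain ⟨a, b, hl, ha, hb⟩ := pv_strip_decomp l
  have hfa : a.filter (fun x => !(pvBadList.contains x)) = a :=
    List.filter_eq_self.mpr (fun c hc => pv_ws_not_bad (ha c hc))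
  have hfb : b.filter (fun x => !(pvBadList.contains x)) = b :=
    List.filter_eq_self.mpr (fun c hc => pv_ws_not_bad (hb c hc))
  conv_rhs => rw [hl]
  rw [List.filter_append, List.filter_append, hfa, hfb]
  unfold PySem.Chars.split₀
  rw [pv_split_go_ws_suffix b hb, pv_split_go_ws_prefix a ha]

-- per-string: A's pipeline equals B's clean
theorem pv_clean_eq (s : String) :
    PySem.Chars.join [' ']
      (PySem.Chars.split₀
        (pvBadList.foldl (fun l c => PySem.Chars.replace l [c] [])
          (PySem.Chars.strip (PySem.Chars.lower s.toList))))
      = pvClean s := by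
  rw [pv_fold_replace, pv_split_filter_strip]
  have hset : pvBadSet = pvBadList := rfl
  simp [pvClean, PySem.Set.contains_eq_listContains, hset]

-- ===== VERDICT (by name: the statement is the Claim_ definition above) =====
theorem normalize_track_key_py_spec : Claim_equal_normalize_track_key_py := by
  intro artist title _
  unfold Spec_normalize_track_key_py
  simp only [normalize_track_key_py, normalize_track_key_py_alt, pv_pair_foldl, pv_clean_eq]
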